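-- pv_equiv track=rewrite | github.com/Hsiang-Chin/Multi-Process-chart-by-Python | main.py | get_part_routes
-- ===== SOURCE A (Python) =====
-- def get_part_routes(matrix) -> list:
--     """獲取每個零件的加工路線"""
--     part_routes = []
--     for row in matrix[1:]:
--         step_dept_map = {}
--         step_dept_map[1] = 1  # 第一步驟固定是部門1
--
--         for dept_idx, cell in enumerate(row[1:], start=1):
--             if cell == '0' or not cell:
--                 continue
--             try:
--                 steps = [int(x) for x in cell.split(',') if x.strip()]
--                 for step in steps:
--                     step_dept_map[step] = dept_idx
--             except ValueError:
--                 continue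
--
--         if step_dept_map:
--             route = []
--             max_step = max(step_dept_map.keys())
--             for i in range(1, max_step + 1):
--                 if i in step_dept_map:
--                     route.append(step_dept_map[i])
--             part_routes.append(route)
--     return part_routes
-- ===== SOURCE B (Python) =====
-- def _cell_steps(cell):
--     """Step numbers listed in one comma-separated cell; [] if a piece is not an integer."""
--     try:
--         return [int(x) for x in cell.split(',') if x.strip()]
--     except ValueError:
--         return []
--
--
-- def get_part_routes(matrix) -> list:
--     """獲取每個零件的加工路線 — collect (step, order, dept) records, sort, sweep once."""
--     part_routes = []
--     for row in matrix[1:]: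
--         records = [(1, 0, 1)]  # the first step is always department 1
--         for dept, cell in enumerate(row[1:], start=1):
--             for step in _cell_steps(cell):
--                 records.append((step, len(records), dept))
--         records.sort()
--         route, last = [], None
--         for step, _, dept in records:
--             if step < 1:
--                 continue  # a step number below 1 names no position in the route
--             if step == last:
--                 route[-1] = dept  # a later record for the same step overrides
--             else:
--                 route.append(dept)
--                 last = step
--         part_routes.append(route)
--     return part_routes
-- ===== Notes on version B (the rewrite author's own statement) =====
-- stated objective: alternative
-- what changed: Replaces the per-row dict plus range(1, max_step+1) membership scan by collect-sort-sweep: all (step, order, dept) records of a row are sorted lexicographically and one linear sweep emits the last record of each equal-step run; no dict, no range loop, no membership tests remain.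
import Mathlib
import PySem

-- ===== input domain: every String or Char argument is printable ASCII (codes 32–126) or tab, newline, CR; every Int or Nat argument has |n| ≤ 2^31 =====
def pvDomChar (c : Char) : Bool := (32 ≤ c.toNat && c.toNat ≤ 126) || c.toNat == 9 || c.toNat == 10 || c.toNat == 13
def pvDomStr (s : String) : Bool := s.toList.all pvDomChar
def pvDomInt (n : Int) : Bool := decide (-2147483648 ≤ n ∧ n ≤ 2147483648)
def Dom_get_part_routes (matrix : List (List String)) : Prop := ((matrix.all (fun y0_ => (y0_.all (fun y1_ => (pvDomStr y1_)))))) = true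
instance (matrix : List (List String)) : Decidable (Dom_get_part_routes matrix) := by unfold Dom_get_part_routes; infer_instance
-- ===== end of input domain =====

-- B replaces A's per-row dict + range(1, max_step+1) membership scan by collect-sort-sweep:
-- all (step, order, dept) records of a row are sorted and one linear sweep keeps the last
-- record of each step run (objective: alternative algorithm, same behaviour).

-- ===== PORT A =====
-- '[int(x) for x in cell.split(',') if x.strip()]': none = the ValueError the try catches.
-- split? is some because the separator "," is nonempty.
def pvStepsA (cell : String) : Option (List Int) :=
  (((PySem.Str.split? cell ",").getD []).filter
      (fun x => PySem.Str.strip x != "")).mapM PySem.Int.ofStr?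

-- the per-row dict loop: step_dept_map = {1: 1}, then the cell loop
def pvRowDictA (row : List String) : PySem.Dict Int Int :=
  (PySem.List.enumerate (PySem.List.slice row (some 1) none) 1).foldl
    (fun d p =>
      if p.2 = "0" ∨ p.2 = "" then d
      else
        match pvStepsA p.2 with
        | none => d            -- except ValueError: continue
        | some steps => steps.foldl (fun d s => d.insert s p.1) d)
    ((PySem.Dict.empty).insert 1 1)

def get_part_routes (matrix : List (List String)) : List (List Int) :=
  (PySem.List.slice matrix (some 1) none).foldl
    (fun acc row =>
      let d := pvRowDictA row
      match PySem.List.max? d.keys (fun x => x) with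
      | none => acc            -- 'if step_dept_map:' is false (empty dict): no append
      | some m =>
        acc ++ [(PySem.List.pyRange 1 (m + 1) 1).foldl
                  (fun r i => if d.contains i then r ++ [d.getD i 0] else r) []])
    []

-- ===== PORT B =====
-- _cell_steps from Source B (the try/except around the comprehension is the mapM's none branch)
def pvCellSteps (cell : String) : List Int :=
  match (((PySem.Str.split? cell ",").getD []).filter
            (fun x => PySem.Str.strip x != "")).mapM PySem.Int.ofStr? with
  | none => []
  | some steps => steps

-- records = [(1, 0, 1)]; records.append((step, len(records), dept))
def pvRecords (row : List String) : List (Int × Int × Int) :=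
  (PySem.List.enumerate (PySem.List.slice row (some 1) none) 1).foldl
    (fun rs p => (pvCellSteps p.2).foldl
        (fun rs' s => rs' ++ [(s, (rs'.length : Int), p.1)]) rs)
    [((1 : Int), (0 : Int), (1 : Int))]

-- the sweep body; 'route[-1] = dept' is dropLast ++ [dept] (route is nonempty whenever
-- that branch runs: 'last' was set when its element was appended)
def pvSweepStep (st : List Int × Option Int) (t : Int × Int × Int) : List Int × Option Int :=
  if t.1 < 1 then st
  else if some t.1 = st.2 then (st.1.dropLast ++ [t.2.2], st.2)
  else (st.1 ++ [t.2.2], some t.1)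

-- records.sort() compares triples lexicographically; the 'order' component (index of the
-- record) is already distinct, so the (step, order) key sorts identically
def get_part_routes_alt (matrix : List (List String)) : List (List Int) :=
  (PySem.List.slice matrix (some 1) none).foldl
    (fun acc row =>
      acc ++ [((PySem.List.sorted2 (pvRecords row) (fun t => t.1)
                  (fun t => t.2.1)).foldl pvSweepStep ([], none)).1])
    []

-- ===== PRECONDITION & SPEC =====
def Spec_get_part_routes (matrix : List (List String)) (out : List (List Int)) : Prop := out = get_part_routes_alt matrix
instance (matrix : List (List String)) (out : List (List Int)) : Decidable (Spec_get_part_routes matrix out) := by unfold Spec_get_part_routes; infer_instance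

-- ===== CLAIM (what is proved, stated in full; the proofs are below) =====
def Claim_equal_get_part_routes : Prop := ∀ (matrix : List (List String)), Dom_get_part_routes matrix → Spec_get_part_routes matrix (get_part_routes matrix)

-- ===== LEMMAS AND PROOFS =====

-- ---- proof-side vocabulary ----

-- A's per-cell step list ('0' and '' skipped)
def pvParseCell (cell : String) : List Int :=
  if cell = "0" ∨ cell = "" then [] else pvCellSteps cell

-- flat (step, dept) observation list of a row, A's skipping
def pvPairsA (row : List String) : List (Int × Int) :=
  (PySem.List.enumerate (PySem.List.slice row (some 1) none) 1).foldl
    (fun ps p => ps ++ (pvParseCell p.2).map (fun s => (s, p.1)))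
    [((1 : Int), (1 : Int))]

-- flat (step, dept) observation list of a row, B's records projected
def pvPairsB (row : List String) : List (Int × Int) :=
  (PySem.List.enumerate (PySem.List.slice row (some 1) none) 1).foldl
    (fun ps p => ps ++ (pvCellSteps p.2).map (fun s => (s, p.1)))
    [((1 : Int), (1 : Int))]

-- dept of the last observation of step s (0 unreachable for s drawn from the list)
def pvLastDept (pairs : List (Int × Int)) (s : Int) : Int :=
  match pairs.reverse.find? (fun q => q.1 == s) with
  | some q => q.2
  | none => 0

-- the canonical route of an observation list
def pvCanon (pairs : List (Int × Int)) : List Int :=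
  ((PySem.List.sorted (PySem.Set.ofList (pairs.map Prod.fst)) (fun x => x)).filter
      (fun s => decide ((1 : Int) ≤ s))).map (pvLastDept pairs)

-- triple version of pvLastDept
def pvLastDeptS (S : List (Int × Int × Int)) (s : Int) : Int :=
  match S.reverse.find? (fun t => t.1 == s) with
  | some t => t.2.2
  | none => 0

-- what the sweep produces after its first append (p = step of the pending dept d)
def pvOutP (p d : Int) : List (Int × Int × Int) → List Int
  | [] => [d]
  | t :: ts => if t.1 = p then pvOutP p t.2.2 ts else d :: pvOutP t.1 t.2.2 ts

-- what the sweep produces from the initial state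
def pvOutN : List (Int × Int × Int) → List Int
  | [] => []
  | t :: ts => if t.1 < 1 then pvOutN ts else pvOutP t.1 t.2.2 ts

-- adjacent dedup of a (sorted) step list
def pvDedupAdj : List Int → List Int
  | [] => []
  | [a] => [a]
  | a :: b :: t => if a = b then pvDedupAdj (b :: t) else a :: pvDedupAdj (b :: t)

-- ---- A-side: route = pvCanon (pvPairsA row) ----

theorem pvRowDictA_eq_foldl_pairs (row : List String) :
    pvRowDictA row = (pvPairsA row).foldl (fun d p => d.insert p.1 p.2) PySem.Dict.empty := by
  unfold pvRowDictA pvPairsA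
  rw [PySem.List.foldl_append_eq_flatMap, List.foldl_append,
    List.flatMap_def, List.foldl_flatten, List.foldl_map]
  apply PySem.List.foldl_congr_mem
  intro d p _
  simp only [List.foldl_map]
  by_cases h0 : p.2 = "0" ∨ p.2 = ""
  · simp [h0, pvParseCell]
  · simp only [h0, pvParseCell, pvCellSteps, pvStepsA]
    cases h : (((PySem.Str.split? p.2 ",").getD []).filter
        (fun x => PySem.Str.strip x != "")).mapM PySem.Int.ofStr? with
    | none => simp
    | some steps => simp

-- lookup after a fold of inserts = last matching pair (reverse find), default for absent keys
theorem getD_foldl_ins (l : List (Int × Int)) (d : PySem.Dict Int Int) (k d0 : Int) :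
    (l.foldl (fun d p => d.insert p.1 p.2) d).getD k d0 =
      match l.reverse.find? (fun q => q.1 == k) with
      | some q => q.2
      | none => d.getD k d0 := by
  induction l generalizing d with
  | nil => simp
  | cons p t ih =>
    simp only [List.foldl_cons, ih, List.reverse_cons, List.find?_append]
    cases h : t.reverse.find? (fun q => q.1 == k) with
    | some q => simp
    | none =>
      simp only [Option.none_or, List.find?, PySem.Dict.getD_insert]
      by_cases hk : p.1 = k
      · simp [hk]
      · rw [beq_eq_false_iff_ne.mpr hk]; simp [Ne.symm hk]

-- the filtered range of A equals the filtered sorted distinct steps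
theorem range_filter_eq_sorted_filter (K : List Int)
    (hpw : (PySem.List.sorted K (fun x => x)).Pairwise (· < ·))
    (m : Int) (hmax : ∀ y ∈ K, y ≤ m) :
    (PySem.List.pyRange 1 (m + 1) 1).filter (fun i => decide (i ∈ K)) =
      (PySem.List.sorted K (fun x => x)).filter (fun s => decide ((1 : Int) ≤ s)) := by
  have hperm : ((PySem.List.pyRange 1 (m + 1) 1).filter (fun i => decide (i ∈ K))).Perm
      ((PySem.List.sorted K (fun x => x)).filter (fun s => decide ((1 : Int) ≤ s))) := by
    apply (List.perm_ext_iff_of_nodup ?_ ?_).mpr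
    · intro x
      simp only [List.mem_filter, PySem.List.mem_pyRange_one, PySem.List.mem_sorted,
        decide_eq_true_eq]
      constructor
      · rintro ⟨⟨h1, _⟩, hK⟩; exact ⟨hK, h1⟩
      · rintro ⟨hK, h1⟩; exact ⟨⟨h1, by have := hmax x hK; omega⟩, hK⟩
    · exact (PySem.List.nodup_pyRange_one 1 (m + 1)).filter _
    · exact (hpw.imp fun h => ne_of_lt h).filter _
  have h1 : ((PySem.List.pyRange 1 (m + 1) 1).filter (fun i => decide (i ∈ K))).Pairwise (· ≤ ·) :=
    ((PySem.List.pairwise_lt_pyRange_one 1 (m + 1)).filter _).imp le_of_lt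
  have h2 : ((PySem.List.sorted K (fun x => x)).filter
      (fun s => decide ((1 : Int) ≤ s))).Pairwise (· ≤ ·) :=
    (hpw.filter _).imp le_of_lt
  exact PySem.List.eq_of_perm_of_pairwise_le_of_injective (fun x => x)
    (fun a b h => h) hperm h1 h2

-- A's per-row route is the canonical route of its observation list
theorem rowA_eq_canon (row : List String) (acc : List (List Int)) :
    (let d := pvRowDictA row
     match PySem.List.max? d.keys (fun x => x) with
     | none => acc
     | some m =>
       acc ++ [(PySem.List.pyRange 1 (m + 1) 1).foldl
                 (fun r i => if d.contains i then r ++ [d.getD i 0] else r) []]) =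
    acc ++ [pvCanon (pvPairsA row)] := by
  simp only []
  have hkeys : (pvRowDictA row).keys = PySem.Set.ofList ((pvPairsA row).map Prod.fst) := by
    rw [pvRowDictA_eq_foldl_pairs]
    rw [PySem.Dict.keys_foldl_insert_key (pvPairsA row) Prod.fst (fun _ p => p.2)]
    rw [PySem.Dict.keys_empty, PySem.Set.update_nil_left]
  have hone : (1 : Int) ∈ (pvPairsA row).map Prod.fst := by
    unfold pvPairsA
    rw [PySem.List.foldl_append_eq_flatMap]
    simp
  cases hmx : PySem.List.max? (pvRowDictA row).keys (fun x => x) with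
  | none =>
    exfalso
    rw [PySem.List.max?_eq_none_iff, hkeys] at hmx
    have : (1 : Int) ∈ PySem.Set.ofList ((pvPairsA row).map Prod.fst) :=
      (PySem.Set.mem_ofList _ _).mpr hone
    simp [hmx] at this
  | some m =>
    have hmax : ∀ y ∈ PySem.Set.ofList ((pvPairsA row).map Prod.fst), y ≤ m := by
      intro y hy
      have := PySem.List.max?_isMax hmx
      exact this y (hkeys ▸ hy)
    show acc ++ _ = acc ++ _
    congr 1
    rw [PySem.List.foldl_append_if (fun i => (pvRowDictA row).contains i)
      (fun i => (pvRowDictA row).getD i 0)]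
    rw [List.nil_append]
    have hc : ∀ i : Int, (pvRowDictA row).contains i
        = decide (i ∈ PySem.Set.ofList ((pvPairsA row).map Prod.fst)) := by
      intro i; rw [PySem.Dict.contains_eq_decide_mem_keys, hkeys]
    simp only [hc]
    rw [range_filter_eq_sorted_filter _ (PySem.List.sorted_ofList_pairwise_lt _) m hmax]
    unfold pvCanon
    congr 1
    apply List.map_congr_left
    intro s _
    rw [pvRowDictA_eq_foldl_pairs, getD_foldl_ins]
    unfold pvLastDept
    cases h : (pvPairsA row).reverse.find? (fun q => q.1 == s) with
    | some q => simp
    | none => simp [PySem.Dict.getD_empty]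

-- ---- the two observation lists have the same canonical route ----

theorem find?_filter_of_imp {α : Type} (l : List α) (p q : α → Bool)
    (h : ∀ x, p x = true → q x = true) :
    (l.filter q).find? p = l.find? p := by
  induction l with
  | nil => rfl
  | cons a t ih =>
    by_cases hq : q a = true
    · by_cases hp : p a = true
      · simp [hq, List.find?, hp]
      · simp [hq, List.find?, hp, ih]
    · have hp : p a = false := by
        cases hpa : p a with
        | false => rfl
        | true => exact absurd (h a hpa) hq
      simp [hq, List.find?, hp, ih]

theorem cellSteps_zero : pvCellSteps "0" = [0] := by decide

theorem cellSteps_empty : pvCellSteps "" = [] := by decide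

-- the steps ≥ 1 of a cell are the same whether or not '0'/'' cells are skipped
theorem parse_filter_eq (c : String) :
    (pvParseCell c).filter (fun s => decide ((1 : Int) ≤ s)) =
      (pvCellSteps c).filter (fun s => decide ((1 : Int) ≤ s)) := by
  unfold pvParseCell
  by_cases h : c = "0" ∨ c = ""
  · rcases h with h | h <;> subst h <;> simp [cellSteps_zero, cellSteps_empty]
  · simp [h]

theorem pairs_filter_eq (row : List String) :
    (pvPairsA row).filter (fun q => decide ((1 : Int) ≤ q.1)) =
      (pvPairsB row).filter (fun q => decide ((1 : Int) ≤ q.1)) := by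
  unfold pvPairsA pvPairsB
  rw [PySem.List.foldl_append_eq_flatMap, PySem.List.foldl_append_eq_flatMap,
    List.filter_append, List.filter_append, List.filter_flatMap, List.filter_flatMap]
  congr 1
  apply List.flatMap_congr
  intro p _
  rw [List.filter_map, List.filter_map]
  have hpred : ∀ (L : List Int),
      L.filter ((fun (q : Int × Int) => decide ((1 : Int) ≤ q.1)) ∘ fun s => (s, p.1)) =
        L.filter (fun s => decide ((1 : Int) ≤ s)) := fun L => rfl
  rw [hpred, hpred, parse_filter_eq]

theorem lastDept_filter (pairs : List (Int × Int)) (s : Int) (hs : (1 : Int) ≤ s) :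
    pvLastDept pairs s = pvLastDept (pairs.filter (fun q => decide ((1 : Int) ≤ q.1))) s := by
  unfold pvLastDept
  rw [← List.filter_reverse]
  rw [find?_filter_of_imp]
  intro q hq
  simp only [beq_iff_eq] at hq
  simp [hq, hs]

theorem canon_congr (P P' : List (Int × Int))
    (h : P.filter (fun q => decide ((1 : Int) ≤ q.1)) =
         P'.filter (fun q => decide ((1 : Int) ≤ q.1))) :
    pvCanon P = pvCanon P' := by
  have hmem : ∀ s : Int, 1 ≤ s → (s ∈ P.map Prod.fst ↔ s ∈ P'.map Prod.fst) := by
    intro s hs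
    constructor
    · intro hm
      obtain ⟨p, hp, hps⟩ := List.mem_map.mp hm
      have hf : p ∈ P'.filter (fun q => decide ((1 : Int) ≤ q.1)) := by
        rw [← h]; exact List.mem_filter.mpr ⟨hp, by simp [hps, hs]⟩
      exact List.mem_map.mpr ⟨p, (List.mem_filter.mp hf).1, hps⟩
    · intro hm
      obtain ⟨p, hp, hps⟩ := List.mem_map.mp hm
      have hf : p ∈ P.filter (fun q => decide ((1 : Int) ≤ q.1)) := by
        rw [h]; exact List.mem_filter.mpr ⟨hp, by simp [hps, hs]⟩
      exact List.mem_map.mpr ⟨p, (List.mem_filter.mp hf).1, hps⟩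
  unfold pvCanon
  have hlist : (PySem.List.sorted (PySem.Set.ofList (P.map Prod.fst)) (fun x => x)).filter
        (fun s => decide ((1 : Int) ≤ s)) =
      (PySem.List.sorted (PySem.Set.ofList (P'.map Prod.fst)) (fun x => x)).filter
        (fun s => decide ((1 : Int) ≤ s)) := by
    have pw1 := PySem.List.sorted_ofList_pairwise_lt (P.map Prod.fst)
    have pw2 := PySem.List.sorted_ofList_pairwise_lt (P'.map Prod.fst)
    apply PySem.List.eq_of_perm_of_pairwise_le_of_injective (fun x => x) (fun a b hab => hab)
    · apply (List.perm_ext_iff_of_nodup ((pw1.imp fun hx => ne_of_lt hx).filter _)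
        ((pw2.imp fun hx => ne_of_lt hx).filter _)).mpr
      intro s
      simp only [List.mem_filter, PySem.List.mem_sorted, PySem.Set.mem_ofList, decide_eq_true_eq]
      constructor
      · rintro ⟨hm, h1⟩; exact ⟨(hmem s h1).mp hm, h1⟩
      · rintro ⟨hm, h1⟩; exact ⟨(hmem s h1).mpr hm, h1⟩
    · exact (pw1.filter _).imp le_of_lt
    · exact (pw2.filter _).imp le_of_lt
  rw [hlist]
  apply List.map_congr_left
  intro s hsm
  have hs1 : (1 : Int) ≤ s := by simpa using (List.mem_filter.mp hsm).2
  rw [lastDept_filter P s hs1, lastDept_filter P' s hs1, h]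

-- ---- B-side: sweep(sorted records) = pvCanon (pvPairsB row) ----

theorem inner_proj (steps : List Int) (d : Int) (acc : List (Int × Int × Int)) :
    (steps.foldl (fun rs' s => rs' ++ [(s, (rs'.length : Int), d)]) acc).map
        (fun t => (t.1, t.2.2)) =
      acc.map (fun t => (t.1, t.2.2)) ++ steps.map (fun s => (s, d)) := by
  induction steps generalizing acc with
  | nil => simp
  | cons s ss ih => simp [List.foldl_cons, ih]

-- projecting the records gives the flat observation list
theorem records_proj (row : List String) :
    (pvRecords row).map (fun t => (t.1, t.2.2)) = pvPairsB row := by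
  unfold pvRecords pvPairsB
  suffices h : ∀ (l : List (Int × String)) (acc : List (Int × Int × Int)),
      (l.foldl (fun rs p => (pvCellSteps p.2).foldl
          (fun rs' s => rs' ++ [(s, (rs'.length : Int), p.1)]) rs) acc).map
        (fun t => (t.1, t.2.2)) =
      l.foldl (fun ps p => ps ++ (pvCellSteps p.2).map (fun s => (s, p.1)))
        (acc.map (fun t => (t.1, t.2.2))) by
    rw [h]; rfl
  intro l
  induction l with
  | nil => intro acc; simp
  | cons p t ih => intro acc; simp only [List.foldl_cons, ih, inner_proj]

theorem inner_seq (steps : List Int) (d : Int) (acc : List (Int × Int × Int))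
    (h : acc.map (fun t => t.2.1) = (List.range acc.length).map (fun (n : Nat) => (n : Int))) :
    (steps.foldl (fun rs' s => rs' ++ [(s, (rs'.length : Int), d)]) acc).map (fun t => t.2.1) =
      (List.range (steps.foldl (fun rs' s => rs' ++ [(s, (rs'.length : Int), d)])
          acc).length).map (fun (n : Nat) => (n : Int)) := by
  induction steps generalizing acc with
  | nil => simpa using h
  | cons s ss ih =>
    simp only [List.foldl_cons]
    apply ih
    simp [List.range_succ, h]

-- the order components of the records are 0,1,2,…
theorem records_seq (row : List String) :
    (pvRecords row).map (fun t => t.2.1) =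
      (List.range (pvRecords row).length).map (fun (n : Nat) => (n : Int)) := by
  unfold pvRecords
  suffices h : ∀ (l : List (Int × String)) (acc : List (Int × Int × Int)),
      acc.map (fun t => t.2.1) = (List.range acc.length).map (fun (n : Nat) => (n : Int)) →
      (l.foldl (fun rs p => (pvCellSteps p.2).foldl
          (fun rs' s => rs' ++ [(s, (rs'.length : Int), p.1)]) rs) acc).map (fun t => t.2.1) =
        (List.range (l.foldl (fun rs p => (pvCellSteps p.2).foldl
            (fun rs' s => rs' ++ [(s, (rs'.length : Int), p.1)]) rs) acc).length).map
          (fun (n : Nat) => (n : Int)) by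
    exact h _ _ (by decide)
  intro l
  induction l with
  | nil => intro acc h; simpa using h
  | cons p t ih => intro acc h; simp only [List.foldl_cons]; exact ih _ (inner_seq _ _ _ h)

-- the comparison records.sort() uses, on the (step, order) key
def pvBef (a b : Int × Int × Int) : Bool :=
  decide (a.1 < b.1) || (!decide (b.1 < a.1) && decide (a.2.1 < b.2.1))

theorem insertBy_pairwise (x : Int × Int × Int) (l : List (Int × Int × Int))
    (hl : l.Pairwise (fun a b => a.1 < b.1 ∨ (a.1 = b.1 ∧ a.2.1 ≤ b.2.1))) :
    (PySem.List.insertBy pvBef x l).Pairwise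
      (fun a b => a.1 < b.1 ∨ (a.1 = b.1 ∧ a.2.1 ≤ b.2.1)) := by
  induction l with
  | nil => simp [show PySem.List.insertBy pvBef x [] = [x] from rfl]
  | cons y ys ih =>
    rw [show PySem.List.insertBy pvBef x (y :: ys) =
      if pvBef x y then x :: y :: ys else y :: PySem.List.insertBy pvBef x ys from rfl]
    rcases List.pairwise_cons.mp hl with ⟨hy, hys⟩
    by_cases hb : pvBef x y = true
    · rw [if_pos hb]
      have hxy : x.1 < y.1 ∨ (x.1 = y.1 ∧ x.2.1 ≤ y.2.1) := by
        simp only [pvBef, Bool.or_eq_true, Bool.and_eq_true, Bool.not_eq_true',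
          decide_eq_true_eq, decide_eq_false_iff_not] at hb
        omega
      refine List.pairwise_cons.mpr ⟨?_, hl⟩
      intro z hz
      rcases List.mem_cons.mp hz with rfl | hz'
      · exact hxy
      · have := hy z hz'; omega
    · rw [if_neg hb]
      have hyx : y.1 < x.1 ∨ (y.1 = x.1 ∧ y.2.1 ≤ x.2.1) := by
        simp only [pvBef, Bool.or_eq_true, Bool.and_eq_true, Bool.not_eq_true',
          decide_eq_true_eq, decide_eq_false_iff_not] at hb
        omega
      refine List.pairwise_cons.mpr ⟨?_, ih hys⟩
      intro z hz
      rcases (PySem.List.mem_insertBy _ _ _ _).mp hz with rfl | hz'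
      · exact hyx
      · exact hy z hz'

theorem foldl_insertBy_pairwise (E : List (Int × Int × Int)) (acc : List (Int × Int × Int))
    (h : acc.Pairwise (fun a b => a.1 < b.1 ∨ (a.1 = b.1 ∧ a.2.1 ≤ b.2.1))) :
    (E.foldl (fun acc x => PySem.List.insertBy pvBef x acc) acc).Pairwise
      (fun a b => a.1 < b.1 ∨ (a.1 = b.1 ∧ a.2.1 ≤ b.2.1)) := by
  induction E generalizing acc with
  | nil => exact h
  | cons e t ih => exact ih _ (insertBy_pairwise e acc h)

-- sorted2 output is pairwise ≤ in the (step, order) lexicographic order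
theorem sorted2_pairwise_le (E : List (Int × Int × Int)) :
    (PySem.List.sorted2 E (fun t => t.1) (fun t => t.2.1)).Pairwise
      (fun a b => a.1 < b.1 ∨ (a.1 = b.1 ∧ a.2.1 ≤ b.2.1)) := by
  rw [show PySem.List.sorted2 E (fun t => t.1) (fun t => t.2.1) =
      E.foldl (fun acc x => PySem.List.insertBy pvBef x acc) [] from rfl]
  exact foldl_insertBy_pairwise E [] (by simp)

-- the sweep from a pending (p, d) state
theorem sweep_fromP (S : List (Int × Int × Int)) (hpw : S.Pairwise (fun a b => a.1 ≤ b.1)) :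
    ∀ (route : List Int) (p d : Int), (1 : Int) ≤ p → (∀ t ∈ S, p ≤ t.1) →
      (S.foldl pvSweepStep (route ++ [d], some p)).1 = route ++ pvOutP p d S := by
  induction hpw with
  | nil => intro route p d hp _; simp [pvOutP]
  | @cons t ts hts hpw' ih =>
    intro route p d hp hall
    have h1 : p ≤ t.1 := hall t (by simp)
    by_cases he : t.1 = p
    · have hstep : pvSweepStep (route ++ [d], some p) t = (route ++ [t.2.2], some p) := by
        unfold pvSweepStep
        rw [if_neg (show ¬ (t.1 < 1) by omega),
          if_pos (show some t.1 = (route ++ [d], some p).2 by simp [he])]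
        simp
      rw [List.foldl_cons, hstep,
        ih route p t.2.2 hp (fun u hu => hall u (List.mem_cons_of_mem _ hu))]
      simp [pvOutP, he]
    · have hstep : pvSweepStep (route ++ [d], some p) t
          = ((route ++ [d]) ++ [t.2.2], some t.1) := by
        unfold pvSweepStep
        rw [if_neg (show ¬ (t.1 < 1) by omega),
          if_neg (show ¬ some t.1 = (route ++ [d], some p).2 by simp [he])]
      rw [List.foldl_cons, hstep, ih (route ++ [d]) t.1 t.2.2 (by omega) hts]
      simp [pvOutP, he]

theorem sweep_fromN (S : List (Int × Int × Int)) (hpw : S.Pairwise (fun a b => a.1 ≤ b.1)) :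
    ∀ route : List Int, (S.foldl pvSweepStep (route, none)).1 = route ++ pvOutN S := by
  induction hpw with
  | nil => intro route; simp [pvOutN]
  | @cons t ts hts hpw' ih =>
    intro route
    by_cases ht : t.1 < 1
    · have hstep : pvSweepStep (route, none) t = (route, none) := by simp [pvSweepStep, ht]
      rw [List.foldl_cons, hstep, ih route]
      simp [pvOutN, ht]
    · have hstep : pvSweepStep (route, none) t = (route ++ [t.2.2], some t.1) := by
        simp [pvSweepStep, ht]
      rw [List.foldl_cons, hstep, sweep_fromP ts hpw' route t.1 t.2.2 (by omega) hts]
      simp [pvOutN, ht]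

theorem mem_dedupAdj (L : List Int) : ∀ s, s ∈ pvDedupAdj L ↔ s ∈ L := by
  induction L with
  | nil => intro s; simp [pvDedupAdj]
  | cons a M ih =>
    cases M with
    | nil => intro s; simp [pvDedupAdj]
    | cons b t =>
      intro s
      by_cases hab : a = b
      · subst hab
        rw [show pvDedupAdj (a :: a :: t) = pvDedupAdj (a :: t) from by simp [pvDedupAdj]]
        rw [ih s]
        simp only [List.mem_cons]
        tauto
      · rw [show pvDedupAdj (a :: b :: t) = a :: pvDedupAdj (b :: t) from by
          simp [pvDedupAdj, hab]]
        simp [List.mem_cons, ih s]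

theorem dedupAdj_pairwise_lt (L : List Int) :
    L.Pairwise (· ≤ ·) → (pvDedupAdj L).Pairwise (· < ·) := by
  induction L with
  | nil => intro _; simp [pvDedupAdj]
  | cons a M ih =>
    cases M with
    | nil => intro _; simp [pvDedupAdj]
    | cons b t =>
      intro h
      rcases List.pairwise_cons.mp h with ⟨ha, h2⟩
      rcases List.pairwise_cons.mp h2 with ⟨hb, _⟩
      by_cases hab : a = b
      · subst hab
        rw [show pvDedupAdj (a :: a :: t) = pvDedupAdj (a :: t) from by simp [pvDedupAdj]]
        exact ih h2
      · rw [show pvDedupAdj (a :: b :: t) = a :: pvDedupAdj (b :: t) from by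
          simp [pvDedupAdj, hab]]
        refine List.pairwise_cons.mpr ⟨?_, ih h2⟩
        intro w hw
        have hwm : w ∈ b :: t := (mem_dedupAdj _ w).mp hw
        rcases List.mem_cons.mp hwm with rfl | hwt
        · exact lt_of_le_of_ne (ha w (by simp)) hab
        · have hblew := hb w hwt
          have haw := ha w (by simp [hwt])
          have hableb := ha b (by simp)
          omega

theorem lastDeptS_cons_of_mem (x : Int × Int × Int) (ts : List (Int × Int × Int)) (s : Int)
    (h : s ∈ ts.map (fun t => t.1)) : pvLastDeptS (x :: ts) s = pvLastDeptS ts s := by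
  unfold pvLastDeptS
  rw [List.reverse_cons, List.find?_append]
  obtain ⟨t, ht, hts⟩ := List.mem_map.mp h
  have hsome : (ts.reverse.find? (fun t => t.1 == s)).isSome := by
    rw [List.find?_isSome]
    exact ⟨t, List.mem_reverse.mpr ht, by simp [hts]⟩
  cases hfind : ts.reverse.find? (fun t => t.1 == s) with
  | none => rw [hfind] at hsome; simp at hsome
  | some u => simp

theorem lastDeptS_cons_of_not_mem (x : Int × Int × Int) (ts : List (Int × Int × Int)) (s : Int)
    (h : ∀ u ∈ ts, u.1 ≠ s) (hx : x.1 = s) : pvLastDeptS (x :: ts) s = x.2.2 := by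
  unfold pvLastDeptS
  rw [List.reverse_cons, List.find?_append]
  rw [List.find?_eq_none.mpr (by intro u hu; simp [h u (List.mem_reverse.mp hu)])]
  simp [hx]

theorem outP_eq (ts : List (Int × Int × Int)) (hpw : ts.Pairwise (fun a b => a.1 ≤ b.1)) :
    ∀ (x : Int × Int × Int), (1 : Int) ≤ x.1 → (∀ u ∈ ts, x.1 ≤ u.1) →
    pvOutP x.1 x.2.2 ts = ((pvDedupAdj (x.1 :: ts.map (fun t => t.1))).filter
        (fun s => decide ((1 : Int) ≤ s))).map (pvLastDeptS (x :: ts)) := by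
  induction hpw with
  | nil =>
    intro x hx _
    simp [pvOutP, pvDedupAdj, pvLastDeptS, hx]
  | @cons u us hus hpw' ih =>
    intro x hx hall
    by_cases he : u.1 = x.1
    · have l1 : pvOutP x.1 x.2.2 (u :: us) = pvOutP u.1 u.2.2 us := by
        simp [pvOutP, he]
      rw [l1, ih u (by omega) hus]
      have l2 : pvDedupAdj (x.1 :: (u :: us).map (fun t => t.1)) =
          pvDedupAdj ((u :: us).map (fun t => t.1)) := by
        simp [pvDedupAdj, he]
      rw [l2]
      apply List.map_congr_left
      intro s hs
      have hsm : s ∈ (u :: us).map (fun t => t.1) := by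
        rw [List.map_cons]
        exact (mem_dedupAdj _ s).mp (List.mem_filter.mp hs).1
      exact (lastDeptS_cons_of_mem x _ s hsm).symm
    · have hlt : x.1 < u.1 := lt_of_le_of_ne (hall u (by simp)) (fun hh => he hh.symm)
      have l1 : pvOutP x.1 x.2.2 (u :: us) = x.2.2 :: pvOutP u.1 u.2.2 us := by
        simp [pvOutP, he]
      have l2 : pvDedupAdj (x.1 :: (u :: us).map (fun t => t.1)) =
          x.1 :: pvDedupAdj ((u :: us).map (fun t => t.1)) := by
        simp only [List.map_cons]
        simp [pvDedupAdj, show ¬ (x.1 = u.1) from fun hh => he hh.symm]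
      rw [l1, l2, List.filter_cons, if_pos (by simp [hx]), List.map_cons]
      congr 1
      · refine (lastDeptS_cons_of_not_mem x _ x.1 ?_ rfl).symm
        intro w hw
        rcases List.mem_cons.mp hw with rfl | hwt
        · omega
        · have := hus w hwt; omega
      · rw [ih u (by omega) hus]
        apply List.map_congr_left
        intro s hs
        have hsm : s ∈ (u :: us).map (fun t => t.1) := by
          rw [List.map_cons]
          exact (mem_dedupAdj _ s).mp (List.mem_filter.mp hs).1
        exact (lastDeptS_cons_of_mem x _ s hsm).symm

theorem dedupAdj_filter_cons_skip (a : Int) (M : List Int) (ha : ¬ (1 : Int) ≤ a) :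
    (pvDedupAdj (a :: M)).filter (fun s => decide ((1 : Int) ≤ s)) =
      (pvDedupAdj M).filter (fun s => decide ((1 : Int) ≤ s)) := by
  cases M with
  | nil => simp [pvDedupAdj, ha]
  | cons b bs =>
    by_cases hab : a = b
    · simp [pvDedupAdj, hab]
    · simp [pvDedupAdj, hab, ha]

-- pvOutN of a step-sorted list, in terms of dedupAdj and last-of-run
theorem outN_eq (S : List (Int × Int × Int)) (hpw : S.Pairwise (fun a b => a.1 ≤ b.1)) :
    pvOutN S = ((pvDedupAdj (S.map (fun t => t.1))).filter
        (fun s => decide ((1 : Int) ≤ s))).map (pvLastDeptS S) := by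
  induction hpw with
  | nil => simp [pvOutN, pvDedupAdj]
  | @cons t ts hts hpw' ih =>
    by_cases ht : t.1 < 1
    · rw [show pvOutN (t :: ts) = pvOutN ts from by simp [pvOutN, ht], ih,
        List.map_cons, dedupAdj_filter_cons_skip _ _ (by omega)]
      apply List.map_congr_left
      intro s hs
      exact (lastDeptS_cons_of_mem t _ s
        ((mem_dedupAdj _ s).mp (List.mem_filter.mp hs).1)).symm
    · rw [show pvOutN (t :: ts) = pvOutP t.1 t.2.2 ts from by simp [pvOutN, ht],
        List.map_cons]
      exact outP_eq ts hpw' t (by omega) hts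

-- dedupAdj of the sorted steps names the sorted distinct steps
theorem dedupAdj_eq_sortedSet (S : List (Int × Int × Int)) (L : List Int)
    (hmem : ∀ s, s ∈ S.map (fun t => t.1) ↔ s ∈ L)
    (hpw : S.Pairwise (fun a b => a.1 ≤ b.1)) :
    PySem.List.sorted (PySem.Set.ofList L) (fun x => x) = pvDedupAdj (S.map (fun t => t.1)) := by
  have hpwM : (S.map (fun t => t.1)).Pairwise ((· ≤ ·) : Int → Int → Prop) :=
    List.pairwise_map.mpr hpw
  have hlt := dedupAdj_pairwise_lt _ hpwM
  apply PySem.List.sorted_eq_of_perm_of_pairwise_lt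
  · apply (List.perm_ext_iff_of_nodup (hlt.imp fun hx => ne_of_lt hx)
      (PySem.Set.nodup_ofList L)).mpr
    intro s
    rw [PySem.Set.mem_ofList]
    constructor
    · intro h; exact (hmem s).mp ((mem_dedupAdj _ s).mp h)
    · intro h; exact (mem_dedupAdj _ s).mpr ((hmem s).mpr h)
  · exact hlt

theorem find?_pairwise_rel {α : Type} (R : α → α → Prop) (l : List α) (p : α → Bool)
    (hpw : l.Pairwise R) :
    ∀ t, l.find? p = some t → ∀ u ∈ l, p u = true → u = t ∨ R t u := by
  induction hpw with
  | nil => intro t ht; simp at ht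
  | @cons a as ha has ih =>
    intro t ht u hu hpu
    by_cases hpa : p a = true
    · rw [List.find?_cons_of_pos hpa] at ht
      have hat := Option.some.inj ht
      rcases List.mem_cons.mp hu with rfl | hu'
      · exact Or.inl hat
      · subst hat; exact Or.inr (ha u hu')
    · rw [List.find?_cons_of_neg (by simp [hpa])] at ht
      rcases List.mem_cons.mp hu with rfl | hu'
      · simp [hpa] at hpu
      · exact ih t ht u hu' hpu

-- last record of a step in the sorted list = last observation in the original list
theorem lastDeptS_sorted (row : List String) (s : Int)
    (hs : s ∈ (pvRecords row).map (fun t => t.1)) :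
    pvLastDeptS (PySem.List.sorted2 (pvRecords row) (fun t => t.1) (fun t => t.2.1)) s =
      pvLastDept (pvPairsB row) s := by
  set E := pvRecords row with hE
  set S := PySem.List.sorted2 E (fun t => t.1) (fun t => t.2.1) with hS
  have hperm : S.Perm E := PySem.List.sorted2_perm E _ _ false
  have hRle := sorted2_pairwise_le E
  have hseq : E.map (fun t => t.2.1) = (List.range E.length).map (fun (n : Nat) => (n : Int)) :=
    records_seq row
  have hndseq : (E.map (fun t => t.2.1)).Nodup := by
    rw [hseq]
    exact List.Nodup.map (fun a b hab => by exact_mod_cast hab) List.nodup_range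
  have hndE : (E.map (fun t => (t.1, t.2.1))).Nodup := by
    apply List.Nodup.of_map Prod.snd
    rw [List.map_map]
    exact hndseq
  have hndS : (S.map (fun t => (t.1, t.2.1))).Nodup := ((hperm.map _).nodup_iff).mpr hndE
  have hneq : S.Pairwise (fun a b => ¬(a.1 = b.1 ∧ a.2.1 = b.2.1)) := by
    have hpm := List.pairwise_map.mp hndS
    exact hpm.imp (by
      intro a b hab hc
      exact hab (by rw [Prod.mk.injEq]; exact ⟨hc.1, hc.2⟩))
  have hRlt : S.Pairwise (fun a b => a.1 < b.1 ∨ (a.1 = b.1 ∧ a.2.1 < b.2.1)) :=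
    (hRle.and hneq).imp (by intro a b hab; omega)
  have hEseqpw : E.Pairwise (fun a b => a.2.1 < b.2.1) := by
    have hp : (E.map (fun t => t.2.1)).Pairwise ((· < ·) : Int → Int → Prop) := by
      rw [hseq]
      exact List.Pairwise.map (fun n : Nat => (n : Int)) (fun a b hab => Int.ofNat_lt.mpr hab) List.pairwise_lt_range
    exact List.pairwise_map.mp hp
  have hSrev : S.reverse.Pairwise (fun a b => b.1 < a.1 ∨ (b.1 = a.1 ∧ b.2.1 < a.2.1)) :=
    List.pairwise_reverse.mpr hRlt
  have hErev : E.reverse.Pairwise (fun a b => b.2.1 < a.2.1) :=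
    List.pairwise_reverse.mpr hEseqpw
  obtain ⟨t0, ht0, hts0⟩ := List.mem_map.mp hs
  have hfindS : ∃ x ∈ S.reverse, (fun t => t.1 == s) x = true :=
    ⟨t0, List.mem_reverse.mpr (hperm.mem_iff.mpr ht0), by simp [hts0]⟩
  have hfindE : ∃ x ∈ E.reverse, (fun t => t.1 == s) x = true :=
    ⟨t0, List.mem_reverse.mpr ht0, by simp [hts0]⟩
  obtain ⟨tS, hftS⟩ := Option.isSome_iff_exists.mp (List.find?_isSome.mpr hfindS)
  obtain ⟨tE, hftE⟩ := Option.isSome_iff_exists.mp (List.find?_isSome.mpr hfindE)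
  have htSmem : tS ∈ S.reverse := List.mem_of_find?_eq_some hftS
  have htEmem : tE ∈ E.reverse := List.mem_of_find?_eq_some hftE
  have htSp := List.find?_some hftS
  have htEp := List.find?_some hftE
  have htSE : tS ∈ E.reverse :=
    List.mem_reverse.mpr (hperm.mem_iff.mp (List.mem_reverse.mp htSmem))
  have htES : tE ∈ S.reverse :=
    List.mem_reverse.mpr (hperm.mem_iff.mpr (List.mem_reverse.mp htEmem))
  have h1 := find?_pairwise_rel _ _ _ hErev tE hftE tS htSE htSp
  have h2 := find?_pairwise_rel _ _ _ hSrev tS hftS tE htES htEp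
  have e1 : tS.1 = s := by simpa using htSp
  have e2 : tE.1 = s := by simpa using htEp
  have heq : tS = tE := by
    rcases h1 with h | h
    · exact h
    · rcases h2 with h' | h'
      · exact h'.symm
      · exfalso; omega
  unfold pvLastDeptS pvLastDept
  rw [← records_proj row]
  rw [show ((pvRecords row).map (fun t => (t.1, t.2.2))).reverse
      = (pvRecords row).reverse.map (fun t => (t.1, t.2.2)) from by rw [List.map_reverse]]
  rw [List.find?_map]
  rw [show ((fun (q : Int × Int) => q.1 == s) ∘ (fun (t : Int × Int × Int) => (t.1, t.2.2)))
      = (fun (t : Int × Int × Int) => t.1 == s) from rfl]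
  rw [hftS, ← hE, hftE, heq]
  rfl

theorem rowB_eq_canon (row : List String) :
    ((PySem.List.sorted2 (pvRecords row) (fun t => t.1)
        (fun t => t.2.1)).foldl pvSweepStep ([], none)).1 = pvCanon (pvPairsB row) := by
  set E := pvRecords row with hE
  set S := PySem.List.sorted2 E (fun t => t.1) (fun t => t.2.1) with hS
  have hperm : S.Perm E := PySem.List.sorted2_perm E _ _ false
  have hpwle : S.Pairwise (fun a b => a.1 ≤ b.1) :=
    (sorted2_pairwise_le E).imp (by intro a b h; omega)
  have h1 : (S.foldl pvSweepStep ([], none)).1 = pvOutN S := by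
    simpa using sweep_fromN S hpwle []
  rw [h1, outN_eq S hpwle]
  unfold pvCanon
  have h2 : (pvPairsB row).map Prod.fst = E.map (fun t => t.1) := by
    rw [← records_proj row, List.map_map]; rfl
  have hmem : ∀ s, s ∈ S.map (fun t => t.1) ↔ s ∈ (pvPairsB row).map Prod.fst := by
    intro s
    rw [h2]
    exact (hperm.map _).mem_iff
  rw [dedupAdj_eq_sortedSet S ((pvPairsB row).map Prod.fst) hmem hpwle]
  apply List.map_congr_left
  intro s hsm
  have hsE : s ∈ E.map (fun t => t.1) :=
    (hperm.map _).mem_iff.mp ((mem_dedupAdj _ s).mp (List.mem_filter.mp hsm).1)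
  exact lastDeptS_sorted row s hsE

-- ===== VERDICT (by name: the statement is the Claim_ definition above) =====
theorem get_part_routes_spec : Claim_equal_get_part_routes := by
  intro matrix _
  unfold Spec_get_part_routes get_part_routes get_part_routes_alt
  apply PySem.List.foldl_congr_mem
  intro acc row _
  rw [rowB_eq_canon row,
    ← canon_congr (pvPairsA row) (pvPairsB row) (pairs_filter_eq row)]
  exact rowA_eq_canon row acc
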